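-- pv_equiv track=rewrite | github.com/TXMack713/helsinki_python_course_24 | vscode/tmcdata/mooc-programming-24/part01-10_story/part05-23_create_tuple/src/create_tuple.py | create_tuple
-- ===== SOURCE A (Python) =====
-- def create_tuple(x: int, y: int, z: int):
--
--     my_list = [x, y, z]
--     my_list.sort()
--     sum = 0
--     for x in my_list:
--         sum += x
--     the_tuple = (my_list[0], my_list[2], sum)
--     return the_tuple
-- ===== SOURCE B (Python) =====
-- def create_tuple(x: int, y: int, z: int):
--     return (min(x, y, z), max(x, y, z), x + y + z)
-- ===== Notes on version B (the rewrite author's own statement) =====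
-- stated objective: simpler
-- what changed: Replaced list-building, in-place sort, and an accumulation loop by direct min/max reductions and a closed-form sum.
import Mathlib
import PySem

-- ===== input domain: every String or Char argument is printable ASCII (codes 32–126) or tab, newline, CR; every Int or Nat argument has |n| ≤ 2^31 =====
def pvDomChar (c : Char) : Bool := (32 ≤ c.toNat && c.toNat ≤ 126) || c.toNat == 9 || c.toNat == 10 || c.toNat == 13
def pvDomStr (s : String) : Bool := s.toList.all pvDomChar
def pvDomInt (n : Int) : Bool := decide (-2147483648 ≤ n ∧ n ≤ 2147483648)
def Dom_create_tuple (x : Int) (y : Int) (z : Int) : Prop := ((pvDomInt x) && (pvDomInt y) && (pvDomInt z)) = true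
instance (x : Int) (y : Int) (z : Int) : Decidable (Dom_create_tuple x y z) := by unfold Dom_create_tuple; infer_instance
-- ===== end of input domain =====

-- B replaces A's list-sort-and-loop by direct min/max reductions and a closed-form sum (simpler; same values).

-- ===== PORT A =====
-- Port of A: build the list, sort it (PySem stable sort, as list.sort), fold to sum, index ends.
def create_tuple (x : Int) (y : Int) (z : Int) : Int × Int × Int :=
  let my_list := PySem.List.sorted [x, y, z] (fun v => v) false
  let sum := my_list.foldl (fun s v => s + v) 0
  (((PySem.List.pyGet? my_list 0).getD 0), ((PySem.List.pyGet? my_list 2).getD 0), sum)  -- length is 3, so in range; default unreachable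

-- ===== PORT B =====
-- Port of B: direct min/max reductions and a closed-form sum.
def create_tuple_alt (x : Int) (y : Int) (z : Int) : Int × Int × Int :=
  (min x (min y z), max x (max y z), x + y + z)

-- ===== PRECONDITION & SPEC =====
def Spec_create_tuple (x : Int) (y : Int) (z : Int) (out : Int × Int × Int) : Prop := out = create_tuple_alt x y z
instance (x : Int) (y : Int) (z : Int) (out : Int × Int × Int) : Decidable (Spec_create_tuple x y z out) := by unfold Spec_create_tuple; infer_instance

-- ===== CLAIM (what is proved, stated in full; the proofs are below) =====
def Claim_equal_create_tuple : Prop := ∀ (x : Int) (y : Int) (z : Int), Dom_create_tuple x y z → Spec_create_tuple x y z (create_tuple x y z)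

-- ===== LEMMAS AND PROOFS =====

-- ===== VERDICT (by name: the statement is the Claim_ definition above) =====
theorem create_tuple_spec : Claim_equal_create_tuple := by
  intro x y z _
  unfold Spec_create_tuple create_tuple create_tuple_alt
  by_cases hyx : y < x <;> by_cases hzx : z < x <;> by_cases hzy : z < y <;>
    simp [PySem.List.sorted, PySem.List.insertBy, List.foldl, PySem.List.pyGet?,
      PySem.List.pyIdx?, min_def, max_def, hyx, hzx, hzy] <;>
    omega
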